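-- pv_equiv track=rewrite | github.com/Vinit2244/Machine-Learning-Models | assignments/3/a3.py | label_encode
-- ===== SOURCE A (Python) =====
-- def label_encode(data):
--     unique_labels = list()
--     for label in data:
--         if label not in unique_labels:
--             unique_labels.append(label)
--     unique_labels.sort()
--     for i in range(len(data)):
--         data[i] = unique_labels.index(data[i])
--     return data
-- ===== SOURCE B (Python) =====
-- def label_encode(data):
--     uniq = set(data)
--     code = {v: sum(1 for u in uniq if u < v) for v in uniq}
--     out = [code[v] for v in data]
--     data[:] = out
--     return data
-- ===== Notes on version B (the rewrite author's own statement) =====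
-- stated objective: alternative
-- what changed: Eliminates sorting and list.index entirely: each distinct label's code is computed directly as the count of distinct values strictly smaller than it (its rank), memoized in a dict over the set and looked up per element.
import Mathlib
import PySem

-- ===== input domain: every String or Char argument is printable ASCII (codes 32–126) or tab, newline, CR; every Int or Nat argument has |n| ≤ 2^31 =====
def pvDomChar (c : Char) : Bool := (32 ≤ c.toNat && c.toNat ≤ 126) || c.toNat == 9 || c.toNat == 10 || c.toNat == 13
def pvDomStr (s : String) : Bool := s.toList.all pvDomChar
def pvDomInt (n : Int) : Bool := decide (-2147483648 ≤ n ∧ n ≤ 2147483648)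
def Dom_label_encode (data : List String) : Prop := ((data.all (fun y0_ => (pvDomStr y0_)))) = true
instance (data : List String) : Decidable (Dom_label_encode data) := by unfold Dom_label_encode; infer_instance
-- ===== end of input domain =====

-- B drops A's sort + list.index entirely: each label's code is the count of distinct values strictly
-- smaller than it (= its rank); equivalence is about the RETURN value (both Pythons also rewrite the
-- caller's list in place, with the same final contents).


-- ===== PORT A =====
def label_encode (data : List String) : List Int :=
  let unique_labels := data.foldl (fun acc label => if label ∈ acc then acc else acc ++ [label]) []
  let sorted_labels := PySem.List.sorted unique_labels (fun x => x) false
  -- unique_labels.index(data[i]): each element of data occurs in the list, so .index never raises;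
  -- index? is always some here and getD 0 is exact
  data.map (fun x => (((PySem.List.index? sorted_labels x).getD 0 : Nat) : Int))

-- ===== PORT B =====
def label_encode_alt (data : List String) : List Int :=
  let uniq : PySem.Set String := PySem.Set.ofList data
  -- {v: sum(1 for u in uniq if u < v) for v in uniq}: each value is a count over the set's
  -- distinct elements (order-independent); the dict is only looked up afterwards
  let code : PySem.Dict String Int :=
    uniq.foldl (fun d v => d.insert v ((uniq.countP (fun u => decide (u < v)) : Nat) : Int))
      PySem.Dict.empty
  -- code[v]: every v of data is a key of code, so the lookup never raises; getD 0 is exact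
  data.map (fun v => code.getD v 0)

-- ===== PRECONDITION & SPEC =====
def Spec_label_encode (data : List String) (out : List Int) : Prop := out = label_encode_alt data
instance (data : List String) (out : List Int) : Decidable (Spec_label_encode data out) := by unfold Spec_label_encode; infer_instance

-- ===== CLAIM =====
def Claim_equal_label_encode : Prop := ∀ (data : List String), Dom_label_encode data → Spec_label_encode data (label_encode data)

-- ===== LEMMAS AND PROOFS =====

-- A's hand-rolled first-occurrence dedup is exactly set(data)'s element list
theorem pv_unique_eq_ofList (data : List String) :
    data.foldl (fun acc label => if label ∈ acc then acc else acc ++ [label]) [] =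
    PySem.Set.ofList data := by
  rw [PySem.Set.ofList_eq_foldl]
  have hf : (fun (acc : List String) label => if label ∈ acc then acc else acc ++ [label]) =
      PySem.Set.add := by
    funext acc x
    simp [PySem.Set.add, PySem.Set.contains]
  rw [hf]

-- folding inserts whose keys all differ from v leaves getD v unchanged
theorem pv_getD_fold_skip (l : List String) (f : String → Int) (d : PySem.Dict String Int)
    (v : String) (h : ∀ x ∈ l, x ≠ v) :
    (l.foldl (fun d x => d.insert x (f x)) d).getD v 0 = d.getD v 0 := by
  induction l generalizing d with
  | nil => rfl
  | cons x t ih =>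
      simp only [List.foldl_cons]
      rw [ih _ (fun q hq => h q (List.mem_cons_of_mem _ hq)),
        PySem.Dict.getD_insert_of_ne _ _ _ (Ne.symm (h x List.mem_cons_self))]

-- on a nodup key list, the comprehension dict looks up f v
theorem pv_getD_fold_insert (l : List String) (f : String → Int) (d : PySem.Dict String Int)
    (v : String) (hn : l.Nodup) (hv : v ∈ l) :
    (l.foldl (fun d x => d.insert x (f x)) d).getD v 0 = f v := by
  induction l generalizing d with
  | nil => cases hv
  | cons x t ih =>
      simp only [List.foldl_cons]
      by_cases hx : x = v
      · subst hx
        rw [pv_getD_fold_skip _ _ _ _ (fun q hq he => (List.nodup_cons.mp hn).1 (by rw [← he]; exact hq)),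
          PySem.Dict.getD_insert_self]
      · have hvt : v ∈ t := by
          cases hv with
          | head => exact absurd rfl hx
          | tail _ h => exact h
        exact ih _ (List.nodup_cons.mp hn).2 hvt

-- in a strictly increasing list, the index of a member is the number of elements below it
theorem pv_index_eq_countP (l : List String) (v : String)
    (hp : l.Pairwise (· < ·)) (hv : v ∈ l) :
    PySem.List.index? l v = some (l.countP (fun u => decide (u < v))) := by
  induction l with
  | nil => cases hv
  | cons x t ih =>
      have hxt : ∀ u ∈ t, x < u := (List.pairwise_cons.mp hp).1
      have hpt : t.Pairwise (· < ·) := (List.pairwise_cons.mp hp).2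
      by_cases hx : x = v
      · subst hx
        have hz : t.countP (fun u => decide (u < x)) = 0 := by
          rw [List.countP_eq_zero]
          intro u hu
          simp only [decide_eq_true_eq]
          exact not_lt.mpr (le_of_lt (hxt u hu))
        rw [PySem.List.index?_cons_self,
          List.countP_cons_of_neg (by simp only [decide_eq_true_eq]; exact lt_irrefl x), hz]
      · have hvt : v ∈ t := by
          cases hv with
          | head => exact absurd rfl hx
          | tail _ h => exact h
        have hxv : x < v := hxt v hvt
        rw [PySem.List.index?_cons_of_ne _ hx, ih hpt hvt,
          List.countP_cons_of_pos (by simp only [decide_eq_true_eq]; exact hxv)]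
        rfl

-- ===== VERDICT =====
theorem label_encode_spec : Claim_equal_label_encode := by
  intro data _
  unfold Spec_label_encode label_encode label_encode_alt
  simp only [pv_unique_eq_ofList]
  apply List.map_congr_left
  intro v hv
  have hmem : v ∈ PySem.List.sorted (PySem.Set.ofList data) (fun x => x) false := by
    rw [PySem.List.mem_sorted]
    exact (PySem.Set.mem_ofList _ _).mpr hv
  rw [pv_index_eq_countP _ v (PySem.List.sorted_ofList_pairwise_lt data) hmem]
  have hperm := PySem.List.sorted_perm (PySem.Set.ofList data) (fun x : String => x) false
  rw [Option.getD_some, hperm.countP_eq,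
    pv_getD_fold_insert _ _ _ v (PySem.Set.nodup_ofList data) ((PySem.Set.mem_ofList _ _).mpr hv)]
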